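-- pv_equiv track=rewrite | github.com/Tusharfv15/leetcode-problem-submissions | 1975-maximum-matrix-sum/1975-maximum-matrix-sum.py | maxMatrixSum
-- ===== SOURCE A (Python) =====
-- from typing import List
--
-- def maxMatrixSum(matrix: List[List[int]]) -> int:
--     n = len(matrix)
--     neg = 0
--     tot_sum = 0
--     min_abs_neg = float('inf')
--     for i in range(n):
--         for j in range(n):
--             tot_sum += abs(matrix[i][j])
--             if matrix[i][j] < 0:
--                 neg+=1
--             min_abs_neg = min(min_abs_neg,abs(matrix[i][j]))
--
--
--
--     if neg%2 == 0:
--         return tot_sum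
--
--     else:
--         return tot_sum - 2*min_abs_neg
-- ===== SOURCE B (Python) =====
-- from typing import List
--
-- def maxMatrixSum(matrix: List[List[int]]) -> int:
--     n = len(matrix)
--     vals = sorted(matrix[i][j] for i in range(n) for j in range(n))
--     k = 0
--     while k < len(vals) and vals[k] < 0:
--         k += 1
--     tot = sum(vals[k:]) - sum(vals[:k])
--     if k % 2 == 0:
--         return tot
--     m = -vals[k - 1]
--     if k < len(vals):
--         m = min(m, vals[k])
--     return tot - 2 * m
-- ===== Notes on version B (the rewrite author's own statement) =====
-- stated objective: alternative
-- what changed: A's single fused loop carrying three accumulators (negative count, abs-sum, running min with a float-inf sentinel) is replaced by sort-then-scan: flatten and sort the values, so the negatives are exactly a prefix whose length gives the parity, the total is sum(suffix)-sum(prefix) with no abs calls, and the minimal absolute value is read off at the sign boundary (last negative vs first nonnegative) instead of being tracked.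
import Mathlib
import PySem

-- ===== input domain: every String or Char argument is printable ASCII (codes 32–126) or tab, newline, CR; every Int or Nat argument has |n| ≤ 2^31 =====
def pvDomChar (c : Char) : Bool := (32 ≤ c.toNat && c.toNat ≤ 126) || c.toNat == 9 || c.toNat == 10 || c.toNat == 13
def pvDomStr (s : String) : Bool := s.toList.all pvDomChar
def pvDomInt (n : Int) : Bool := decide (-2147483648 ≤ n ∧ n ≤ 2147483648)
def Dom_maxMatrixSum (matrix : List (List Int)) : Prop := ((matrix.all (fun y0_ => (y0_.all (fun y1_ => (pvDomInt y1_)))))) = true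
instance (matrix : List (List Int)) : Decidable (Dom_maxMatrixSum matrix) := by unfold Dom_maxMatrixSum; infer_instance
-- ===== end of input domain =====

-- B replaces A's fused three-accumulator loop by sort-then-scan: the negatives of the
-- sorted flattened list are a prefix whose length gives the parity, and the minimal
-- absolute value is read at the sign boundary (objective: alternative, same value).

-- ===== PORT A =====
-- A's fused loop state: (neg, tot_sum, min_abs_neg); min_abs_neg = none models float('inf').
def maxMatrixSum (matrix : List (List Int)) : Int :=
  let n : Int := matrix.length
  let s := (PySem.List.pyRange 0 n 1).foldl (fun s i =>
    (PySem.List.pyRange 0 n 1).foldl (fun s j =>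
      let v := PySem.List.pyGetD (PySem.List.pyGetD matrix i []) j 0
      let tot := s.2.1 + |v|
      let neg := if v < 0 then s.1 + 1 else s.1
      let m : Option Int := match s.2.2 with
        | none => some |v|
        | some m => some (min m |v|)
      (neg, tot, m)) s) ((0 : Int), (0 : Int), (none : Option Int))
  if PySem.Int.mod s.1 2 = 0 then s.2.1 else s.2.1 - 2 * s.2.2.getD 0

-- ===== PORT B =====
-- B's while loop 'k = 0; while k < len(vals) and vals[k] < 0: k += 1', transliterated
-- as the structurally equivalent prefix recursion over the sorted list.
def pvNegPrefix : List Int → Nat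
  | [] => 0
  | x :: t => if x < 0 then pvNegPrefix t + 1 else 0

def maxMatrixSum_alt (matrix : List (List Int)) : Int :=
  let n : Int := matrix.length
  let vals := PySem.List.sorted
    ((PySem.List.pyRange 0 n 1).flatMap (fun i =>
      (PySem.List.pyRange 0 n 1).map (fun j =>
        PySem.List.pyGetD (PySem.List.pyGetD matrix i []) j 0))) (fun x => x) false
  let k := pvNegPrefix vals
  let tot := (PySem.List.slice vals (some (k : Int)) none).sum
           - (PySem.List.slice vals none (some (k : Int))).sum
  if PySem.Int.mod (k : Int) 2 = 0 then tot
  else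
    let m := -(PySem.List.pyGetD vals ((k : Int) - 1) 0)
    let m := if k < vals.length then min m (PySem.List.pyGetD vals (k : Int) 0) else m
    tot - 2 * m

-- ===== PRECONDITION & SPEC =====
-- Pre_ excludes non-square inputs (a row shorter than the matrix), where A's
-- matrix[i][j] raises IndexError (and B's identical comprehension raises too).
def Pre_maxMatrixSum (matrix : List (List Int)) : Prop :=
  ∀ r ∈ matrix, matrix.length ≤ r.length
instance (matrix : List (List Int)) : Decidable (Pre_maxMatrixSum matrix) := by
  unfold Pre_maxMatrixSum; infer_instance

def pvWitness_maxMatrixSum : List (List Int) := [[1, -4], [-5, 3]]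

def Spec_maxMatrixSum (matrix : List (List Int)) (out : Int) : Prop := out = maxMatrixSum_alt matrix
instance (matrix : List (List Int)) (out : Int) : Decidable (Spec_maxMatrixSum matrix out) := by unfold Spec_maxMatrixSum; infer_instance

-- ===== CLAIM =====
def Claim_equal_maxMatrixSum : Prop := ∀ (matrix : List (List Int)), Dom_maxMatrixSum matrix → Pre_maxMatrixSum matrix → Spec_maxMatrixSum matrix (maxMatrixSum matrix)

-- ===== LEMMAS AND PROOFS =====

-- A's per-element state update, as a function over the flattened value.
def pvStepA (s : Int × Int × Option Int) (v : Int) : Int × Int × Option Int :=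
  let tot := s.2.1 + |v|
  let neg := if v < 0 then s.1 + 1 else s.1
  let m : Option Int := match s.2.2 with
    | none => some |v|
    | some m => some (min m |v|)
  (neg, tot, m)

def pvMinComb (mo : Option Int) (l : List Int) : Option Int :=
  l.foldl (fun mo v => match mo with
    | none => some |v|
    | some m => some (min m |v|)) mo

lemma pvStepA_fold (l : List Int) :
    ∀ (neg tot : Int) (mo : Option Int),
      l.foldl pvStepA (neg, tot, mo) =
        (neg + (l.countP (fun v => decide (v < 0)) : Int),
         tot + (l.map (fun v => |v|)).sum,
         pvMinComb mo l) := by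
  induction l with
  | nil => intro neg tot mo; simp [pvMinComb]
  | cons x t ih =>
      intro neg tot mo
      simp only [List.foldl_cons, List.map_cons, List.sum_cons, List.countP_cons, pvStepA,
        pvMinComb, ih, Prod.mk.injEq]
      refine ⟨?_, ?_, trivial⟩
      · split <;> simp_all <;> ring_nf
      · ring

lemma pvMinComb_some (l : List Int) :
    ∀ m : Int, pvMinComb (some m) l = some ((l.map (fun v => |v|)).foldl min m) := by
  induction l with
  | nil => intro m; simp [pvMinComb]
  | cons x t ih => intro m; simpa [pvMinComb] using ih (min m |x|)

lemma pvMinComb_eq_min? (l : List Int) :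
    pvMinComb none l = PySem.List.min? (l.map (fun v => |v|)) (fun x => x) := by
  cases l with
  | nil => simp [pvMinComb, PySem.List.min?]
  | cons x t =>
      have h := PySem.List.min?_id_cons (x := |x|) (t := t.map (fun v => |v|))
      simp only [List.map_cons, h]
      show pvMinComb (some |x|) t = _
      rw [pvMinComb_some]

-- A's nested index loop is the fold of pvStepA over the flattened value list.
lemma pvNested (matrix : List (List Int)) (init : Int × Int × Option Int) :
    (PySem.List.pyRange 0 (matrix.length : Int) 1).foldl (fun s i =>
      (PySem.List.pyRange 0 (matrix.length : Int) 1).foldl (fun s j =>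
        let v := PySem.List.pyGetD (PySem.List.pyGetD matrix i []) j 0
        let tot := s.2.1 + |v|
        let neg := if v < 0 then s.1 + 1 else s.1
        let m : Option Int := match s.2.2 with
          | none => some |v|
          | some m => some (min m |v|)
        (neg, tot, m)) s) init =
    ((PySem.List.pyRange 0 (matrix.length : Int) 1).flatMap (fun i =>
      (PySem.List.pyRange 0 (matrix.length : Int) 1).map (fun j =>
        PySem.List.pyGetD (PySem.List.pyGetD matrix i []) j 0))).foldl pvStepA init := by
  rw [List.foldl_flatMap]
  simp only [List.foldl_map]
  rfl

lemma pvNegPrefix_eq_takeWhile (l : List Int) :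
    pvNegPrefix l = (l.takeWhile (fun v => decide (v < 0))).length := by
  induction l with
  | nil => rfl
  | cons x t ih =>
      by_cases h : x < 0 <;> simp [pvNegPrefix, h, ih]

lemma pvNegPrefix_eq_countP (l : List Int) (hs : l.Pairwise (· ≤ ·)) :
    pvNegPrefix l = l.countP (fun v => decide (v < 0)) := by
  induction l with
  | nil => rfl
  | cons x t ih =>
      rcases List.pairwise_cons.1 hs with ⟨hx, ht⟩
      by_cases h : x < 0
      · simp [pvNegPrefix, h, ih ht]
      · have : t.countP (fun v => decide (v < 0)) = 0 := by
          rw [List.countP_eq_zero]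
          intro y hy
          simp only [decide_eq_true_eq, not_lt]
          exact le_trans (not_lt.1 h) (hx y hy)
        simp [pvNegPrefix, h, this]

lemma pv_sumAbs_of_neg (l : List Int) (h : ∀ x ∈ l, x < 0) :
    (l.map (fun v => |v|)).sum = -l.sum := by
  induction l with
  | nil => simp
  | cons x t ih =>
      simp only [List.map_cons, List.sum_cons]
      rw [ih (fun y hy => h y (List.mem_cons_of_mem _ hy)),
        abs_of_neg (h x List.mem_cons_self)]
      ring

lemma pv_sumAbs_of_nonneg (l : List Int) (h : ∀ x ∈ l, 0 ≤ x) :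
    (l.map (fun v => |v|)).sum = l.sum := by
  induction l with
  | nil => simp
  | cons x t ih =>
      simp only [List.map_cons, List.sum_cons]
      rw [ih (fun y hy => h y (List.mem_cons_of_mem _ hy)),
        abs_of_nonneg (h x List.mem_cons_self)]

lemma pv_dropWhile_nonneg (l : List Int) (hs : l.Pairwise (· ≤ ·)) :
    ∀ x ∈ l.dropWhile (fun v => decide (v < 0)), 0 ≤ x := by
  induction l with
  | nil => simp
  | cons a t ih =>
      rcases List.pairwise_cons.1 hs with ⟨ha, ht⟩
      by_cases h : a < 0
      · simpa [List.dropWhile_cons, h] using ih ht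
      · intro x hx
        simp only [List.dropWhile_cons, decide_eq_true_eq, h, if_false] at hx
        rcases List.mem_cons.1 hx with rfl | hx
        · exact not_lt.1 h
        · exact le_trans (not_lt.1 h) (ha x hx)

-- A's tracked minimum equals any value that is an attained lower bound of the |·|-image.
lemma pv_min_eq (l S : List Int) (hperm : S.Perm l) (m : Int)
    (hmem : ∃ x ∈ S, |x| = m) (hlb : ∀ x ∈ S, m ≤ |x|) :
    (pvMinComb none l).getD 0 = m := by
  rcases hmem with ⟨x0, hx0, hm⟩
  have hlne : l.map (fun v => |v|) ≠ [] := by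
    have : l ≠ [] := by
      intro h; subst h
      exact absurd (hperm.mem_iff.1 hx0) (by simp)
    simpa using this
  obtain ⟨mu, hmu⟩ : ∃ mu, PySem.List.min? (l.map (fun v => |v|)) (fun x => x) = some mu := by
    cases hmin : PySem.List.min? (l.map (fun v => |v|)) (fun x => x) with
    | none => exact absurd (((PySem.List.min?_eq_none_iff _ _).1 hmin)) hlne
    | some mu => exact ⟨mu, rfl⟩
  rw [pvMinComb_eq_min?, hmu, Option.getD_some]
  have hmumem : mu ∈ l.map (fun v => |v|) := PySem.List.min?_mem hmu
  have hmulb : ∀ y ∈ l.map (fun v => |v|), mu ≤ y := by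
    intro y hy
    exact PySem.List.min?_isMin hmu y hy
  apply le_antisymm
  · -- mu ≤ m since m = |x0| is in the image
    have : m ∈ l.map (fun v => |v|) := by
      rw [List.mem_map]
      exact ⟨x0, hperm.mem_iff.1 hx0, hm⟩
    exact hmulb m this
  · -- m ≤ mu since mu = |x| for some x ∈ l = some x ∈ S
    rcases List.mem_map.1 hmumem with ⟨x, hxl, rfl⟩
    exact hlb x (hperm.mem_iff.2 hxl)

-- The core algebraic identity: the sort-then-scan computation equals the fused-loop
-- aggregates, for any list S that is a sorted permutation of the flattened values l.
lemma pv_core (l S : List Int) (hperm : S.Perm l) (hs : S.Pairwise (· ≤ ·)) :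
    (if PySem.Int.mod ((l.countP (fun v => decide (v < 0)) : Nat) : Int) 2 = 0
      then (l.map (fun v => |v|)).sum
      else (l.map (fun v => |v|)).sum - 2 * (pvMinComb none l).getD 0) =
    (let k := pvNegPrefix S
     let tot := (PySem.List.slice S (some (k : Int)) none).sum
              - (PySem.List.slice S none (some (k : Int))).sum
     if PySem.Int.mod (k : Int) 2 = 0 then tot
     else
       let m := -(PySem.List.pyGetD S ((k : Int) - 1) 0)
       let m := if k < S.length then min m (PySem.List.pyGetD S (k : Int) 0) else m
       tot - 2 * m) := by
  obtain ⟨T, D, hTD⟩ : ∃ T D, T ++ D = S ∧ T = S.takeWhile (fun v => decide (v < 0)) ∧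
      D = S.dropWhile (fun v => decide (v < 0)) :=
    ⟨_, _, List.takeWhile_append_dropWhile, rfl, rfl⟩
  obtain ⟨hTD, hTdef, hDdef⟩ := hTD
  have hTneg : ∀ x ∈ T, x < 0 := fun x hx => by
    rw [hTdef] at hx
    simpa using List.mem_takeWhile_imp hx
  have hDpos : ∀ x ∈ D, 0 ≤ x := fun x hx => by
    rw [hDdef] at hx
    exact pv_dropWhile_nonneg S hs x hx
  have hk : pvNegPrefix S = T.length := by
    rw [pvNegPrefix_eq_takeWhile S, hTdef]
  clear hTdef hDdef
  subst hTD
  have hcount : l.countP (fun v => decide (v < 0)) = pvNegPrefix (T ++ D) :=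
    by rw [pvNegPrefix_eq_countP _ hs, hperm.countP_eq]
  have hslice1 : PySem.List.slice (T ++ D) (some ((pvNegPrefix (T ++ D) : Nat) : Int)) none = D := by
    rw [hk, PySem.List.slice_from_natCast]
    exact List.drop_left
  have hslice2 : PySem.List.slice (T ++ D) none (some ((pvNegPrefix (T ++ D) : Nat) : Int)) = T := by
    rw [hk, PySem.List.slice_to_natCast]
    exact List.take_left
  have habs : (l.map (fun v => |v|)).sum = D.sum - T.sum := by
    have hmp : (((T ++ D).map (fun v => |v|)).sum = (l.map (fun v => |v|)).sum) :=
      (hperm.map _).sum_eq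
    rw [← hmp, List.map_append, List.sum_append, pv_sumAbs_of_neg T hTneg,
      pv_sumAbs_of_nonneg D hDpos]
    ring
  simp only [hcount, hslice1, hslice2, habs]
  by_cases hpar : PySem.Int.mod ((pvNegPrefix (T ++ D) : Nat) : Int) 2 = 0
  · rw [if_pos hpar, if_pos hpar]
  · rw [if_neg hpar, if_neg hpar]
    have hk0 : pvNegPrefix (T ++ D) ≠ 0 := by
      intro h0
      rw [h0] at hpar
      exact hpar rfl
    have hk1 : 1 ≤ T.length := by omega
    have hkm1T : T.length - 1 < T.length := by omega
    have hkm1 : T.length - 1 < (T ++ D).length := by simp; omega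
    -- the element at the sign boundary: the last negative
    have hget1 : PySem.List.pyGetD (T ++ D) ((pvNegPrefix (T ++ D) : Int) - 1) 0
        = T[T.length - 1]'hkm1T := by
      have hcast : ((pvNegPrefix (T ++ D) : Int) - 1) = ((T.length - 1 : Nat) : Int) := by
        rw [hk]; omega
      rw [hcast, PySem.List.pyGetD_natCast, List.getD_eq_getElem _ _ hkm1,
        List.getElem_append_left hkm1T]
    have haneg : T[T.length - 1]'hkm1T < 0 := hTneg _ (List.getElem_mem hkm1T)
    have hTbound : ∀ x ∈ T, x ≤ T[T.length - 1]'hkm1T := by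
      intro x hx
      rcases List.mem_iff_getElem.1 hx with ⟨j, hj, rfl⟩
      have hjS : j < (T ++ D).length := by simp; omega
      have h1 : (T ++ D)[j]'hjS = T[j]'hj := List.getElem_append_left hj
      have h2 : (T ++ D)[T.length - 1]'hkm1 = T[T.length - 1]'hkm1T :=
        List.getElem_append_left hkm1T
      rw [← h1, ← h2]
      rcases Nat.lt_or_ge j (T.length - 1) with h | h
      · exact List.pairwise_iff_getElem.1 hs j (T.length - 1) hjS hkm1 h
      · have : j = T.length - 1 := by omega
        subst this
        exact le_refl _
    by_cases hlt : pvNegPrefix (T ++ D) < (T ++ D).length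
    · -- a first nonnegative element exists
      have hD0 : D ≠ [] := by
        intro h0
        have hlt' := hlt
        rw [hk] at hlt'
        have hlen : (T ++ D).length = T.length + D.length := List.length_append
        have hdl : D.length = 0 := by rw [h0]; rfl
        omega
      have hD0' : 0 < D.length := List.length_pos_iff.2 hD0
      have hget2 : PySem.List.pyGetD (T ++ D) ((pvNegPrefix (T ++ D) : Nat) : Int) 0
          = D[0]'hD0' := by
        have hTlen : T.length < (T ++ D).length := by simp; omega
        rw [hk, PySem.List.pyGetD_natCast, List.getD_eq_getElem _ _ hTlen]
        rw [List.getElem_append_right (le_refl T.length)]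
        simp
      have hbpos : 0 ≤ D[0]'hD0' := hDpos _ (List.getElem_mem hD0')
      have hDbound : ∀ x ∈ D, D[0]'hD0' ≤ x := by
        intro x hx
        rcases List.mem_iff_getElem.1 hx with ⟨j, hj, rfl⟩
        have hjS : T.length + j < (T ++ D).length := by simp; omega
        have hTS : T.length + 0 < (T ++ D).length := by simp; omega
        have h1 : (T ++ D)[T.length + j]'hjS = D[j]'hj := by
          rw [List.getElem_append_right (by omega)]
          congr 1
          omega
        have h2 : (T ++ D)[T.length + 0]'hTS = D[0]'hD0' := by
          rw [List.getElem_append_right (by omega)]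
          congr 1
          omega
        rw [← h1, ← h2]
        rcases Nat.lt_or_ge (T.length + 0) (T.length + j) with h | h
        · exact List.pairwise_iff_getElem.1 hs _ _ hTS hjS h
        · have : j = 0 := by omega
          subst this
          exact le_refl _
      rw [if_pos hlt, hget1, hget2]
      congr 1
      congr 1
      apply pv_min_eq l (T ++ D) hperm
      · -- the boundary min is attained
        rcases min_choice (-(T[T.length - 1]'hkm1T)) (D[0]'hD0') with h | h
        · rw [h, ← abs_of_neg haneg]
          exact ⟨_, List.mem_append_left D (List.getElem_mem hkm1T), rfl⟩
        · rw [h, ← abs_of_nonneg hbpos]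
          exact ⟨_, List.mem_append_right T (List.getElem_mem hD0'), rfl⟩
      · -- and bounds every |x| from below
        intro x hx
        rcases List.mem_append.1 hx with hx | hx
        · rw [abs_of_neg (hTneg x hx)]
          have := hTbound x hx
          refine le_trans (min_le_left _ _) (by omega)
        · rw [abs_of_nonneg (hDpos x hx)]
          exact le_trans (min_le_right _ _) (hDbound x hx)
    · -- every value is negative: the boundary min is |last negative|
      have hD0 : D = [] := by
        apply List.length_eq_zero_iff.1
        have hlt' := hlt
        rw [hk] at hlt'
        have hlen : (T ++ D).length = T.length + D.length := List.length_append
        omega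
      rw [if_neg hlt, hget1]
      congr 1
      congr 1
      apply pv_min_eq l (T ++ D) hperm
      · rw [← abs_of_neg haneg]
        exact ⟨_, List.mem_append_left D (List.getElem_mem hkm1T), rfl⟩
      · intro x hx
        have hxT : x ∈ T := by
          rw [hD0, List.append_nil] at hx
          exact hx
        rw [abs_of_neg (hTneg x hxT)]
        have := hTbound x hxT
        omega

-- ===== VERDICT =====
theorem maxMatrixSum_spec : Claim_equal_maxMatrixSum := by
  intro matrix _ _
  show maxMatrixSum matrix = maxMatrixSum_alt matrix
  unfold maxMatrixSum maxMatrixSum_alt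
  simp only [pvNested, pvStepA_fold, zero_add]
  exact pv_core _ _ (PySem.List.sorted_perm _ _ _) (PySem.List.sorted_pairwise _ _)
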